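-- pv_equiv track=rewrite | github.com/nishi10mo/AtCoder | practice/AtCoder Beginner Contest/ABC294/C.py | f
-- ===== SOURCE A (Python) =====
-- def f(N, M, A, B):
--     C = A + B
--     C = sorted(C)
--     C_dict = {}
--     for i, v in enumerate(C):
--         C_dict[v] = i
--     A_ans = []
--     B_ans = []
--     for a in A:
--         A_ans.append(C_dict[a]+1)
--     for b in B:
--         B_ans.append(C_dict[b]+1)
--     return A_ans, B_ans
-- ===== SOURCE B (Python) =====
-- def f(N, M, A, B):
--     # sort once, then binary-search each element's rank; no dict is built
--     C = sorted(A + B)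
--     def rank(x):  # number of elements of C that are <= x
--         lo, hi = 0, len(C)
--         while lo < hi:
--             mid = (lo + hi) // 2
--             if x < C[mid]:
--                 hi = mid
--             else:
--                 lo = mid + 1
--         return lo
--     return [rank(a) for a in A], [rank(b) for b in B]
-- ===== Notes on version B (the rewrite author's own statement) =====
-- stated objective: alternative
-- what changed: B drops the value-to-last-index dict entirely: it sorts once and binary-searches each element's rank (count of elements <= x) in the sorted array.
import Mathlib
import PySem

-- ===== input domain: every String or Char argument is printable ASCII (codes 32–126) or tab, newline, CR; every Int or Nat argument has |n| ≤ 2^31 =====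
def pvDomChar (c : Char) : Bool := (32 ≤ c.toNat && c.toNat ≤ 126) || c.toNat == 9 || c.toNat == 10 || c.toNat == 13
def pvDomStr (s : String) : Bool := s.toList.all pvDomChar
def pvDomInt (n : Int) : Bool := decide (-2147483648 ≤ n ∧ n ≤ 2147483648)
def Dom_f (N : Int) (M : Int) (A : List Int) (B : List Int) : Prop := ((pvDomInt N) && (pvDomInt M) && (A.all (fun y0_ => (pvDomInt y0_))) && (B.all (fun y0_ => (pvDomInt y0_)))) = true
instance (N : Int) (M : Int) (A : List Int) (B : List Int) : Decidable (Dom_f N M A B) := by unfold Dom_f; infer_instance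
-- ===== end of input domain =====

-- B replaces the value-to-last-index dict with a per-element binary search on the sorted array (alternative algorithm, same cost).

-- ===== PORT A =====
def f (N : Int) (M : Int) (A : List Int) (B : List Int) : List Int × List Int :=
  let C := PySem.List.sorted (A ++ B) (fun x => x) false
  let d := (PySem.List.enumerate C 0).foldl (fun d iv => d.insert iv.2 iv.1) (PySem.Dict.empty : PySem.Dict Int Int)
  -- C_dict[a] / C_dict[b]: the key is always present (a ∈ A ⊆ C, b ∈ B ⊆ C), so getD's default is unreachable — exact
  let A_ans := A.foldl (fun acc a => acc ++ [PySem.Dict.getD d a 0 + 1]) ([] : List Int)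
  let B_ans := B.foldl (fun acc b => acc ++ [PySem.Dict.getD d b 0 + 1]) ([] : List Int)
  (A_ans, B_ans)

-- ===== PORT B =====
-- the 'while lo < hi' binary-search loop of Source B's rank(); lo, hi stay in [0, len(C)], so
-- '(lo + hi) // 2' is Nat division and 'C[mid]' is in range (getD's default is unreachable) — exact
def rankLoop (C : List Int) (x : Int) (lo hi : Nat) : Nat :=
  if _h : lo < hi then
    -- mid = (lo + hi) // 2, inlined
    if x < C.getD ((lo + hi) / 2) 0 then rankLoop C x lo ((lo + hi) / 2)
    else rankLoop C x ((lo + hi) / 2 + 1) hi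
  else lo
termination_by hi - lo
decreasing_by all_goals omega

def f_alt (N : Int) (M : Int) (A : List Int) (B : List Int) : List Int × List Int :=
  let C := PySem.List.sorted (A ++ B) (fun x => x) false
  (A.map (fun x => (rankLoop C x 0 C.length : Int)),
   B.map (fun x => (rankLoop C x 0 C.length : Int)))

-- ===== PRECONDITION & SPEC =====
def Spec_f (N : Int) (M : Int) (A : List Int) (B : List Int) (out : List Int × List Int) : Prop := out = f_alt N M A B
instance (N : Int) (M : Int) (A : List Int) (B : List Int) (out : List Int × List Int) : Decidable (Spec_f N M A B out) := by unfold Spec_f; infer_instance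

-- ===== CLAIM (what is proved, stated in full; the proofs are below) =====
def Claim_equal_f : Prop := ∀ (N : Int) (M : Int) (A : List Int) (B : List Int), Dom_f N M A B → Spec_f N M A B (f N M A B)

-- ===== LEMMAS AND PROOFS =====

-- A's dict, built from enumerate over a sorted list, maps each member v to (count of elements ≤ v) - 1.
theorem dict_fold_getD (C : List Int) (hs : C.Pairwise (· ≤ ·)) :
    ∀ (k : Int) (d0 : PySem.Dict Int Int) (v : Int),
    PySem.Dict.getD ((PySem.List.enumerate C k).foldl (fun d iv => d.insert iv.2 iv.1) d0) v 0 =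
      if v ∈ C then k + (C.countP (fun y => decide (y ≤ v)) : Int) - 1 else PySem.Dict.getD d0 v 0 := by
  induction C with
  | nil => intro k d0 v; simp [PySem.List.enumerate_nil]
  | cons c t ih =>
    intro k d0 v
    rw [PySem.List.enumerate_cons]
    simp only [List.foldl_cons]
    rw [ih hs.tail (k + 1) (d0.insert c k) v]
    have hct : ∀ x ∈ t, c ≤ x := fun x hx => List.rel_of_pairwise_cons hs hx
    by_cases hvt : v ∈ t
    · have hcv : decide (c ≤ v) = true := by simp [hct v hvt]
      simp only [List.mem_cons, hvt, or_true, List.countP_cons, hcv, if_pos]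
      push_cast; ring
    · rw [if_neg hvt, PySem.Dict.getD_insert]
      by_cases hvc : v = c
      · subst hvc
        have htz : t.countP (fun y => decide (y ≤ v)) = 0 := by
          rw [List.countP_eq_zero]
          intro x hx
          have hne : x ≠ v := fun h => hvt (h ▸ hx)
          have := hct x hx
          simp only [decide_eq_true_eq]
          omega
        simp [htz]
      · simp [hvc, hvt]

theorem rank_eq (A B : List Int) (x : Int) (hx : x ∈ A ++ B) :
    PySem.Dict.getD ((PySem.List.enumerate (PySem.List.sorted (A ++ B) (fun x => x) false) 0).foldl
        (fun d iv => d.insert iv.2 iv.1) (PySem.Dict.empty : PySem.Dict Int Int)) x 0 + 1 =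
      ((PySem.List.sorted (A ++ B) (fun x => x) false).countP (fun y => decide (y ≤ x)) : Int) := by
  set C := PySem.List.sorted (A ++ B) (fun x => x) false with hC
  have hmem : x ∈ C := (PySem.List.sorted_perm _ _ _).mem_iff.mpr hx
  rw [dict_fold_getD C (PySem.List.sorted_pairwise (A ++ B) (fun x => x)) 0 _ x, if_pos hmem]
  ring

-- the binary search ends at the boundary between elements ≤ x and elements > x
theorem rankLoop_inv (C : List Int) (hs : C.Pairwise (· ≤ ·)) (x : Int) :
    ∀ (n lo hi : Nat), hi - lo = n → hi ≤ C.length → lo ≤ hi →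
      (∀ j (h : j < C.length), j < lo → C[j] ≤ x) →
      (∀ j (h : j < C.length), hi ≤ j → x < C[j]) →
      rankLoop C x lo hi ≤ C.length ∧
        (∀ j (h : j < C.length), C[j] ≤ x ↔ j < rankLoop C x lo hi) := by
  have hmono : ∀ i j (hi : i < C.length) (hj : j < C.length), i ≤ j → C[i] ≤ C[j] := by
    intro i j hi' hj' hij
    rcases Nat.lt_or_ge i j with h | h
    · exact (List.pairwise_iff_getElem.mp hs) i j hi' hj' h
    · have : i = j := by omega
      subst this; exact le_refl _
  intro n
  induction n using Nat.strong_induction_on with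
  | _ n IH =>
    intro lo hi hn hhi hlohi hlow hhigh
    rw [rankLoop]
    by_cases h : lo < hi
    · rw [dif_pos h]
      have hmidlt : (lo + hi) / 2 < hi := by omega
      have hmidge : lo ≤ (lo + hi) / 2 := by omega
      have hmidlen : (lo + hi) / 2 < C.length := by omega
      rw [List.getD_eq_getElem C 0 hmidlen]
      by_cases hx : x < C[(lo + hi) / 2]
      · rw [if_pos hx]
        exact IH ((lo + hi) / 2 - lo) (by omega) lo ((lo + hi) / 2) rfl (by omega) hmidge hlow
          (fun j hj hge => lt_of_lt_of_le hx (hmono _ j hmidlen hj hge))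
      · rw [if_neg hx]
        exact IH (hi - ((lo + hi) / 2 + 1)) (by omega) ((lo + hi) / 2 + 1) hi rfl hhi (by omega)
          (fun j hj hlt => le_trans (hmono j _ hj hmidlen (by omega)) (by omega)) hhigh
    · rw [dif_neg h]
      have : lo = hi := by omega
      subst this
      refine ⟨by omega, fun j hj => ⟨fun hle => ?_, fun hlt => hlow j hj hlt⟩⟩
      by_contra hge
      exact absurd (hhigh j hj (by omega)) (by omega)

-- a list cut at position r (≤ x below, > x from r on) has exactly r elements ≤ x
theorem countP_of_cut (C : List Int) (x : Int) (r : Nat) (hr : r ≤ C.length)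
    (h : ∀ j (hj : j < C.length), C[j] ≤ x ↔ j < r) :
    C.countP (fun y => decide (y ≤ x)) = r := by
  have hsplit := List.take_append_drop r C
  calc C.countP (fun y => decide (y ≤ x))
      = (C.take r).countP (fun y => decide (y ≤ x)) + (C.drop r).countP (fun y => decide (y ≤ x)) := by
        conv_lhs => rw [← hsplit]
        rw [List.countP_append]
    _ = r := by
        have h1 : (C.take r).countP (fun y => decide (y ≤ x)) = (C.take r).length := by
          rw [List.countP_eq_length]
          intro y hy
          obtain ⟨i, hi, hv⟩ := List.mem_iff_getElem.mp hy
          rw [List.getElem_take] at hv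
          simp only [List.length_take] at hi
          have hil : i < C.length := by omega
          simp only [decide_eq_true_eq]
          exact hv ▸ (h i hil).mpr (by omega)
        have h2 : (C.drop r).countP (fun y => decide (y ≤ x)) = 0 := by
          rw [List.countP_eq_zero]
          intro y hy
          obtain ⟨i, hi, hv⟩ := List.mem_iff_getElem.mp hy
          rw [List.getElem_drop] at hv
          simp only [List.length_drop] at hi
          have hil : r + i < C.length := by omega
          simp only [decide_eq_true_eq]
          intro hle
          have := (h (r + i) hil).mp (hv ▸ hle)
          omega
        rw [h1, h2]
        simp only [List.length_take]
        omega

-- B's rank equals the count of elements ≤ x in the sorted list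
theorem rankLoop_eq_countP (C : List Int) (hs : C.Pairwise (· ≤ ·)) (x : Int) :
    rankLoop C x 0 C.length = C.countP (fun y => decide (y ≤ x)) := by
  obtain ⟨hle, hiff⟩ := rankLoop_inv C hs x C.length 0 C.length rfl le_rfl (Nat.zero_le _)
    (fun j hj hlt => absurd hlt (by omega)) (fun j hj hge => absurd hge (by omega))
  exact (countP_of_cut C x _ hle hiff).symm

-- ===== VERDICT (by name: the statement is the Claim_ definition above) =====
theorem f_spec : Claim_equal_f := by
  intro N M A B _
  unfold Spec_f f f_alt
  simp only [PySem.List.foldl_append_singleton_eq_map, List.nil_append]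
  have hsort := PySem.List.sorted_pairwise (A ++ B) (fun x : Int => x)
  refine Prod.ext ?_ ?_ <;> simp only <;>
    exact List.map_congr_left fun x hx => by
      rw [rank_eq A B x (by simp [hx]), rankLoop_eq_countP _ hsort]
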